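-- pv_equiv track=rewrite | github.com/EricaEmmm/CodePython | NowCoder/拼多多_种树.py | dfs
-- ===== SOURCE A (Python) =====
-- def check(tree, left):
--     """
--     剪枝：判断剩余坑数和任意品种树之间的关系
--     :param tree: 每种树的数量
--     :param left: 剩余坑数
--     :return:     方案是否可行
--     """
--     # 若left为偶数，那么只要某品种树i的数量tree[i] > left / 2，就表示肯定种不了
--     # 若left为奇数，那么只要某品种树i的数量tree[i] > left+1 / 2，就表示肯定种不了
--     for i in tree[1:]:
--         if i > (left+1) // 2:
--             return False
--     return True
--
-- def dfs(tree, ans, n, m, idx):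
--     """
--     :param tree: 每种树的数量
--     :param ans:  种树方案
--     :param n:    树的品种数
--     :param m:    树坑总数
--     :param idx:  种到第几课
--     :return:     方案是否可行
--     """
--     if idx == m:                # 所有坑都种满了
--         return True
--     if not check(tree, m-idx):  # 某品种树剩余数量大于未种坑数的一半
--         return False
--
--     for i in range(1, n+1):
--         if (idx == 0) or (tree[i] > 0 and i != ans[idx-1]):
--             ans.append(i)
--             tree[i] -= 1
--             if dfs(tree, ans, n, m, idx+1):
--                 return True
--             ans.pop()
--             tree[i] += 1
--     return False
-- ===== SOURCE B (Python) =====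
-- def dfs(tree, ans, n, m, idx):
--     # Closed-form feasibility test (no recursion): an adjacent-distinct arrangement of the
--     # remaining left = m-idx trees exists iff every remaining count is at most
--     # ceil(left/2) and the count of the previously planted species is at most
--     # floor(left/2).  No recursion.  (Return value only: does not mutate
--     # tree/ans, while the original appends the found plan on success.)
--     left = m - idx
--     if left == 0:
--         return True
--     half = (left + 1) // 2
--     if any(c > half for c in tree[1:]):
--         return False
--     if idx != 0:
--         p = ans[idx - 1]
--         if 1 <= p <= n and tree[p] > left // 2:
--             return False
--     return True
-- ===== Notes on version B (the rewrite author's own statement) =====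
-- stated objective: simpler
-- what changed: A's recursive backtracking search over all placements (with a pruning check at every node) is replaced by a single closed-form feasibility test: an adjacent-distinct arrangement of the remaining m-idx trees exists iff every count is at most ceil((m-idx)/2) and the previously planted species' count is at most floor((m-idx)/2).
-- outside the precondition, e.g. on dfs([0, 0, 0], [], 2, 2, 0): A returns False, B returns True; on dfs([0, 1, 0], [], 2, 3, 0): A returns False, B returns True
import Mathlib
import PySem

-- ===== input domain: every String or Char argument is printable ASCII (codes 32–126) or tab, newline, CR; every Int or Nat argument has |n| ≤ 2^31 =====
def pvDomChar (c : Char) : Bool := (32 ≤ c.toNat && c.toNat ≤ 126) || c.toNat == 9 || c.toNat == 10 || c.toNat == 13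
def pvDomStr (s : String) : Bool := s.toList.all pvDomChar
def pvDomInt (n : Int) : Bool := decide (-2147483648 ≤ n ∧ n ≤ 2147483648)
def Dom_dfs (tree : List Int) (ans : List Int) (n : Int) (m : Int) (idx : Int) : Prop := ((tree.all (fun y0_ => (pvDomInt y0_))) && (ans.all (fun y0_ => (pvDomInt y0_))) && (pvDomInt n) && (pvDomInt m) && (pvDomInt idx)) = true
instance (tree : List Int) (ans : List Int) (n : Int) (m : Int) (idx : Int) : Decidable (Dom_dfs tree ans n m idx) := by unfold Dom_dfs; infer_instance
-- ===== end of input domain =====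

-- B replaces A's recursive backtracking search by a closed-form feasibility test (every
-- count ≤ ceil(left/2) and the previous species' count ≤ floor(left/2)); return value
-- only: A also appends the found plan to ans and decrements tree, B mutates nothing.

-- ===== PORT A =====
-- check(tree, left): 'for i in tree[1:]: if i > (left+1)//2: return False; return True'
def checkLoop : List Int → Int → Bool
  | [], _ => true
  | c :: rest, left =>
    if c > PySem.Int.floordiv (left + 1) 2 then false else checkLoop rest left

def check (tree : List Int) (left : Int) : Bool :=
  checkLoop (PySem.List.slice tree (some 1) none) left

-- body of dfs; the Nat fuel (= m - idx on the admitted inputs) only makes the Python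
-- recursion idx → idx+1 structural, the fuel-0 branch is unreachable under Pre_.
-- The for-loop with early 'return True' is List.any over range(1, n+1).
def dfsGo (fuel : Nat) (tree : List Int) (ans : List Int) (n : Int) (m : Int) (idx : Int) : Bool :=
    if idx == m then true
    else if !check tree (m - idx) then false
    else
      match fuel with
      | 0 => false
      | Nat.succ f =>
        (PySem.List.pyRange 1 (n + 1) 1).any (fun i =>
          (idx == 0 || (decide (0 < (PySem.List.pyGet? tree i).getD 0) &&
                        decide (i ≠ (PySem.List.pyGet? ans (idx - 1)).getD 0))) &&
          dfsGo f (PySem.List.pySetD tree i ((PySem.List.pyGet? tree i).getD 0 - 1))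
                  (ans ++ [i]) n m (idx + 1))

def dfs (tree : List Int) (ans : List Int) (n : Int) (m : Int) (idx : Int) : Bool :=
  dfsGo (m - idx).toNat tree ans n m idx

-- ===== PORT B =====
def dfs_alt (tree : List Int) (ans : List Int) (n : Int) (m : Int) (idx : Int) : Bool :=
  let left := m - idx
  if left == 0 then true
  else
    let half := PySem.Int.floordiv (left + 1) 2
    if (PySem.List.slice tree (some 1) none).any (fun c => decide (c > half)) then false
    else if idx != 0 then
      let p := (PySem.List.pyGet? ans (idx - 1)).getD 0
      if decide (1 ≤ p) && decide (p ≤ n) &&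
         decide ((PySem.List.pyGet? tree p).getD 0 > PySem.Int.floordiv left 2) then false
      else true
    else true

-- ===== PRECONDITION & SPEC =====
-- Pre_ admits every input on which A answers before recursing (idx = m, or some count
-- exceeds the ceil((m-idx)/2) pruning bound) and, among the remaining inputs, the
-- function's intended planting states: tree holds one nonnegative count per species
-- 1..n (tree[0] is unused), the counts sum to the m-idx pits still to fill, and ans
-- already holds the idx trees planted so far.  It excludes inconsistent states that A
-- searches: there A either raises (IndexError / RecursionError) or returns a value
-- that is an artifact of applying its all-counts-must-be-planted pruning heuristic
-- to counts that do not match the remaining pits (see the cited examples).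
def Pre_dfs (tree : List Int) (ans : List Int) (n : Int) (m : Int) (idx : Int) : Prop :=
  idx = m ∨
  (¬ ∀ c ∈ tree.tail, 2 * c ≤ (m - idx) + 1) ∨
  ((tree.length : Int) = n + 1 ∧ (∀ c ∈ tree.tail, 0 ≤ c) ∧
   tree.tail.sum = m - idx ∧ (ans.length : Int) = idx)
instance (tree : List Int) (ans : List Int) (n : Int) (m : Int) (idx : Int) : Decidable (Pre_dfs tree ans n m idx) := by unfold Pre_dfs; infer_instance

def pvWitness_dfs : List Int × List Int × Int × Int × Int := ([0, 1, 1], [], 2, 2, 0)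

def Spec_dfs (tree : List Int) (ans : List Int) (n : Int) (m : Int) (idx : Int) (out : Bool) : Prop := out = dfs_alt tree ans n m idx
instance (tree : List Int) (ans : List Int) (n : Int) (m : Int) (idx : Int) (out : Bool) : Decidable (Spec_dfs tree ans n m idx out) := by unfold Spec_dfs; infer_instance

-- ===== CLAIM (what is proved, stated in full; the proofs are below) =====
def Claim_equal_dfs : Prop := ∀ (tree : List Int) (ans : List Int) (n : Int) (m : Int) (idx : Int), Dom_dfs tree ans n m idx → Pre_dfs tree ans n m idx → Spec_dfs tree ans n m idx (dfs tree ans n m idx)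

-- ===== LEMMAS AND PROOFS =====

-- count of species p among the per-species counts cs (0 if p is no species)
def cnt (cs : List Int) (p : Int) : Int :=
  if 1 ≤ p ∧ p ≤ (cs.length : Int) then cs.getD (p - 1).toNat 0 else 0

-- closed-form feasibility: L pits left, previous species p
def Feas (cs : List Int) (L p : Int) : Prop :=
  L = 0 ∨ ((∀ c ∈ cs, 2 * c ≤ L + 1) ∧ 2 * cnt cs p ≤ L)

theorem dfsGo_unfold (fuel : Nat) (tree ans : List Int) (n m idx : Int) :
    dfsGo fuel tree ans n m idx =
      (if idx == m then true
       else if !check tree (m - idx) then false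
       else
         match fuel with
         | 0 => false
         | Nat.succ f =>
           (PySem.List.pyRange 1 (n + 1) 1).any (fun i =>
             (idx == 0 || (decide (0 < (PySem.List.pyGet? tree i).getD 0) &&
                           decide (i ≠ (PySem.List.pyGet? ans (idx - 1)).getD 0))) &&
             dfsGo f (PySem.List.pySetD tree i ((PySem.List.pyGet? tree i).getD 0 - 1))
                     (ans ++ [i]) n m (idx + 1))) := by rw [dfsGo.eq_def]

theorem sum_getD (cs : List Int) :
    cs.sum = ∑ k ∈ Finset.range cs.length, cs.getD k 0 := by
  induction cs with
  | nil => simp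
  | cons c cs ih =>
    simp [Finset.sum_range_succ', ih, add_comm]

theorem getD_nonneg {cs : List Int} (h : ∀ c ∈ cs, 0 ≤ c) (k : Nat) : 0 ≤ cs.getD k 0 := by
  by_cases hk : k < cs.length
  · rw [List.getD_eq_getElem _ _ hk]; exact h _ (List.getElem_mem hk)
  · rw [List.getD_eq_default _ _ (by omega)]

theorem cnt_nonneg {cs : List Int} (h : ∀ c ∈ cs, 0 ≤ c) (p : Int) : 0 ≤ cnt cs p := by
  unfold cnt; split
  · exact getD_nonneg h _
  · rfl

theorem pair_le_sum {cs : List Int} (h : ∀ c ∈ cs, 0 ≤ c) {j k : Nat}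
    (hj : j < cs.length) (hk : k < cs.length) (hjk : j ≠ k) :
    cs.getD j 0 + cs.getD k 0 ≤ cs.sum := by
  rw [sum_getD]
  have hsub : ({j, k} : Finset ℕ) ⊆ Finset.range cs.length := by
    intro x hx
    simp only [Finset.mem_insert, Finset.mem_singleton] at hx
    rcases hx with rfl | rfl <;> simp [Finset.mem_range, hj, hk]
  calc cs.getD j 0 + cs.getD k 0 = ∑ x ∈ ({j, k} : Finset ℕ), cs.getD x 0 := by
        rw [Finset.sum_pair hjk]
    _ ≤ ∑ x ∈ Finset.range cs.length, cs.getD x 0 :=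
        Finset.sum_le_sum_of_subset_of_nonneg hsub (fun x _ _ => getD_nonneg h x)

theorem sum_set_eq {cs : List Int} {j : Nat} (hj : j < cs.length) (v : Int) :
    (cs.set j v).sum = cs.sum - cs.getD j 0 + v := by
  have h1 : cs.sum = (cs.take j).sum + (cs[j] + (cs.drop (j + 1)).sum) := by
    conv_lhs => rw [← List.take_append_drop j cs, List.drop_eq_getElem_cons hj]
    rw [List.sum_append, List.sum_cons]
  rw [List.sum_set, List.getD_eq_getElem _ _ hj, if_pos hj]
  omega

theorem list_sum_nonneg {cs : List Int} (h : ∀ c ∈ cs, 0 ≤ c) : 0 ≤ cs.sum := by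
  induction cs with
  | nil => simp
  | cons c cs ih =>
    have := h c List.mem_cons_self
    have := ih (fun d hd => h d (List.mem_cons_of_mem _ hd))
    simp only [List.sum_cons]; omega

-- the greedy step: if the state is feasible and L ≥ 1, some plantable species j+1 ≠ p
-- (one of maximal count) leaves a feasible state
theorem exists_step {cs : List Int} {L p : Int}
    (hnn : ∀ c ∈ cs, 0 ≤ c) (hsum : cs.sum = L) (hL : 1 ≤ L)
    (hok : ∀ c ∈ cs, 2 * c ≤ L + 1) (hp : 2 * cnt cs p ≤ L) :
    ∃ j : Nat, j < cs.length ∧ ((j : Int) + 1 ≠ p) ∧ 1 ≤ cs.getD j 0 ∧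
      Feas (cs.set j (cs.getD j 0 - 1)) (L - 1) ((j : Int) + 1) := by
  have hmemS : ∀ k, k ∈ (Finset.range cs.length).filter (fun k : ℕ => ((k : Int) + 1 ≠ p)) ↔
      k < cs.length ∧ ((k : Int) + 1 ≠ p) := by
    intro k; simp [Finset.mem_filter, Finset.mem_range]
  have hSne : ((Finset.range cs.length).filter (fun k : ℕ => ((k : Int) + 1 ≠ p))).Nonempty := by
    rw [Finset.filter_nonempty_iff]
    by_contra hno
    push_neg at hno
    have hall : ∀ k, k < cs.length → (k : Int) + 1 = p := by
      intro k hk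
      by_contra hkp
      exact hkp (hno k (Finset.mem_range.mpr hk))
    cases cs with
    | nil => simp at hsum; omega
    | cons a cs' =>
      cases cs' with
      | nil =>
        have h1 : (0 : Int) + 1 = p := hall 0 (by simp)
        have hcnt : cnt [a] p = a := by
          unfold cnt
          rw [if_pos (by simp; omega)]
          simp [show (p - 1).toNat = 0 by omega]
        simp only [List.sum_cons, List.sum_nil, add_zero] at hsum
        omega
      | cons b cs'' =>
        have h1 := hall 0 (by simp)
        have h2 := hall 1 (by simp)
        omega
  obtain ⟨j, hjS, hmax⟩ :=
    Finset.exists_max_image ((Finset.range cs.length).filter (fun k : ℕ => ((k : Int) + 1 ≠ p)))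
      (fun k : ℕ => cs.getD k 0) hSne
  obtain ⟨hj, hjp⟩ := (hmemS j).mp hjS
  have hjmem : cs.getD j 0 ∈ cs := by
    rw [List.getD_eq_getElem _ _ hj]; exact List.getElem_mem hj
  have hpos : 1 ≤ cs.getD j 0 := by
    by_contra hneg
    push_neg at hneg
    have hzero : ∀ k ∈ (Finset.range cs.length).filter (fun k : ℕ => ((k : Int) + 1 ≠ p)),
        cs.getD k 0 = 0 := by
      intro k hk
      have h1 := hmax k hk
      have h2 := getD_nonneg hnn k
      simp only at h1
      omega
    have hsplit := Finset.sum_filter_add_sum_filter_not (Finset.range cs.length)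
      (fun k : ℕ => ((k : Int) + 1 ≠ p)) (fun k : ℕ => cs.getD k 0)
    have hS0 : ∑ k ∈ (Finset.range cs.length).filter (fun k : ℕ => ((k : Int) + 1 ≠ p)),
        cs.getD k 0 = 0 := Finset.sum_eq_zero hzero
    have hT : ∑ k ∈ (Finset.range cs.length).filter (fun k : ℕ => ¬((k : Int) + 1 ≠ p)),
        cs.getD k 0 ≤ cnt cs p := by
      by_cases hpr : 1 ≤ p ∧ p ≤ (cs.length : Int)
      · have hsub : (Finset.range cs.length).filter (fun k : ℕ => ¬((k : Int) + 1 ≠ p)) ⊆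
            {(p - 1).toNat} := by
          intro k hk
          simp only [Finset.mem_filter, Finset.mem_range, not_not] at hk
          simp only [Finset.mem_singleton]
          omega
        calc ∑ k ∈ (Finset.range cs.length).filter (fun k : ℕ => ¬((k : Int) + 1 ≠ p)), cs.getD k 0
            ≤ ∑ k ∈ ({(p - 1).toNat} : Finset ℕ), cs.getD k 0 :=
              Finset.sum_le_sum_of_subset_of_nonneg hsub (fun x _ _ => getD_nonneg hnn x)
          _ = cs.getD (p - 1).toNat 0 := Finset.sum_singleton _ _
          _ = cnt cs p := by unfold cnt; rw [if_pos hpr]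
      · have hempty : (Finset.range cs.length).filter (fun k : ℕ => ¬((k : Int) + 1 ≠ p)) = ∅ := by
          rw [Finset.filter_eq_empty_iff]
          intro k hk
          simp only [Finset.mem_range] at hk
          push_neg at hpr
          simp only [not_not]
          omega
        rw [hempty, Finset.sum_empty]
        exact cnt_nonneg hnn p
    rw [← sum_getD] at hsplit
    omega
  refine ⟨j, hj, hjp, hpos, ?_⟩
  by_cases hL1 : L = 1
  · exact Or.inl (by omega)
  · refine Or.inr ⟨?_, ?_⟩
    · intro c hc
      rw [List.mem_iff_getElem] at hc
      obtain ⟨k, hk, rfl⟩ := hc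
      have hk' : k < cs.length := by simpa using hk
      rw [List.getElem_set]
      by_cases hjk : j = k
      · rw [if_pos hjk]
        have := hok _ hjmem
        omega
      · rw [if_neg hjk]
        by_cases hkp : (k : Int) + 1 = p
        · have hpr : 1 ≤ p ∧ p ≤ (cs.length : Int) := by omega
          have hcq : cnt cs p = cs[k] := by
            unfold cnt
            rw [if_pos hpr, show (p - 1).toNat = k by omega, List.getD_eq_getElem _ _ hk']
          omega
        · have hkS : k ∈ (Finset.range cs.length).filter (fun k : ℕ => ((k : Int) + 1 ≠ p)) :=
            (hmemS k).mpr ⟨hk', hkp⟩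
          have hlek := hmax k hkS
          simp only at hlek
          rw [List.getD_eq_getElem _ _ hk'] at hlek
          by_contra hgt
          have hpair := pair_le_sum hnn hj hk' hjk
          rw [List.getD_eq_getElem _ _ hk'] at hpair
          have hokk := hok _ (List.getElem_mem hk')
          omega
    · have hpr : 1 ≤ (j : Int) + 1 ∧ (j : Int) + 1 ≤ ((cs.set j (cs.getD j 0 - 1)).length : Int) := by
        simp only [List.length_set]
        omega
      unfold cnt
      rw [if_pos hpr, show ((j : Int) + 1 - 1).toNat = j by omega,
          List.getD_eq_getElem _ _ (by simpa using hj), List.getElem_set, if_pos rfl]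
      have := hok _ hjmem
      omega

-- conversely, if the previous species p holds too many trees, no legal move leads to a
-- feasible state
theorem branch_dead {cs : List Int} {L p : Int} {j : Nat}
    (hnn : ∀ c ∈ cs, 0 ≤ c) (hsum : cs.sum = L) (hL : 1 ≤ L)
    (hok : ∀ c ∈ cs, 2 * c ≤ L + 1) (hp : ¬ 2 * cnt cs p ≤ L)
    (hj : j < cs.length) (hne : (j : Int) + 1 ≠ p) (hpos : 1 ≤ cs.getD j 0) :
    ¬ Feas (cs.set j (cs.getD j 0 - 1)) (L - 1) ((j : Int) + 1) := by
  have hpin : 1 ≤ p ∧ p ≤ (cs.length : Int) := by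
    by_contra hout
    have : cnt cs p = 0 := by unfold cnt; rw [if_neg hout]
    omega
  have hqlen : (p - 1).toNat < cs.length := by omega
  have hcntq : cnt cs p = cs.getD (p - 1).toNat 0 := by unfold cnt; rw [if_pos hpin]
  have hqj : (p - 1).toNat ≠ j := by omega
  intro hfeas
  rcases hfeas with h0 | ⟨h1, _⟩
  · have hpair := pair_le_sum hnn hqlen hj hqj
    omega
  · have hmemq : (cs.set j (cs.getD j 0 - 1))[(p - 1).toNat]'(by simpa using hqlen) ∈
        cs.set j (cs.getD j 0 - 1) := List.getElem_mem _
    have h2 := h1 _ hmemq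
    rw [List.getElem_set, if_neg (fun h => hqj h.symm)] at h2
    rw [List.getD_eq_getElem _ _ hqlen] at hcntq
    omega

theorem checkLoop_iff (cs : List Int) (left : Int) :
    checkLoop cs left = true ↔ ∀ c ∈ cs, 2 * c ≤ left + 1 := by
  induction cs with
  | nil => simp [checkLoop]
  | cons c rest ih =>
    by_cases h : c > PySem.Int.floordiv (left + 1) 2
    · simp only [checkLoop, if_pos h]
      have hc : ¬ 2 * c ≤ left + 1 := by
        intro hc
        exact h.not_ge ((PySem.Int.le_floordiv_iff_mul_le (by norm_num)).mpr (by omega))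
      simp only [Bool.false_eq_true, false_iff]
      intro hall
      exact hc (hall c List.mem_cons_self)
    · simp only [checkLoop, if_neg h, ih]
      have hc : 2 * c ≤ left + 1 := by
        have := (PySem.Int.le_floordiv_iff_mul_le (a := left + 1) (b := 2) (q := c)
          (by norm_num)).mp (by omega)
        omega
      constructor
      · intro hall d hd
        rcases List.mem_cons.mp hd with rfl | hd
        · exact hc
        · exact hall d hd
      · intro hall d hd; exact hall d (List.mem_cons_of_mem _ hd)

theorem check_iff (t0 : Int) (cs : List Int) (left : Int) :
    check (t0 :: cs) left = true ↔ ∀ c ∈ cs, 2 * c ≤ left + 1 := by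
  rw [check, PySem.List.slice_from_one, List.tail_cons, checkLoop_iff]

theorem getPy (t0 : Int) (cs : List Int) {j : Nat} (hj : j < cs.length) :
    (PySem.List.pyGet? (t0 :: cs) ((j : Int) + 1)).getD 0 = cs.getD j 0 := by
  rw [PySem.List.pyGet?_cons_succ, PySem.List.pyGet?_natCast,
      List.getElem?_eq_getElem hj, List.getD_eq_getElem _ _ hj]
  rfl

theorem setPy (t0 : Int) (cs : List Int) (j : Nat) (v : Int) :
    PySem.List.pySetD (t0 :: cs) ((j : Int) + 1) v = t0 :: cs.set j v := by
  rw [show ((j : Int) + 1) = ((j + 1 : ℕ) : Int) by push_cast; ring, PySem.List.pySetD_natCast]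
  rfl

theorem dfsGo_eq (fuel : Nat) : ∀ (t0 : Int) (cs ans : List Int) (n m idx : Int),
    (cs.length : Int) = n → (∀ c ∈ cs, 0 ≤ c) → cs.sum = m - idx →
    (ans.length : Int) = idx → m - idx ≤ (fuel : Int) →
    (dfsGo fuel (t0 :: cs) ans n m idx = true ↔
      Feas cs (m - idx) (if idx = 0 then 0 else (PySem.List.pyGet? ans (idx - 1)).getD 0)) := by
  induction fuel with
  | zero =>
    intro t0 cs ans n m idx hlen hnn hsum hans hfuel
    have hge : 0 ≤ m - idx := hsum ▸ list_sum_nonneg hnn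
    have hidx : idx = m := by simp at hfuel; omega
    constructor
    · intro _; exact Or.inl (by omega)
    · intro _; rw [dfsGo_unfold, if_pos (by simp [hidx])]
  | succ f ih =>
    intro t0 cs ans n m idx hlen hnn hsum hans hfuel
    have hge : 0 ≤ m - idx := hsum ▸ list_sum_nonneg hnn
    by_cases hidx : idx = m
    · constructor
      · intro _; exact Or.inl (by omega)
      · intro _; rw [dfsGo_unfold, if_pos (by simp [hidx])]
    · have hL : 1 ≤ m - idx := by omega
      have hnem : ¬ ((idx == m) = true) := by simp [hidx]
      by_cases hok : ∀ c ∈ cs, 2 * c ≤ (m - idx) + 1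
      case neg =>
        have hchk : check (t0 :: cs) (m - idx) = false := by
          rw [← Bool.not_eq_true, check_iff]; exact hok
        rw [dfsGo_unfold, if_neg hnem, if_pos (by rw [hchk]; rfl)]
        simp only [Bool.false_eq_true, false_iff, Feas]
        rintro (h0 | ⟨h1, _⟩)
        · omega
        · exact hok h1
      case pos =>
        have hchk : check (t0 :: cs) (m - idx) = true := (check_iff _ _ _).mpr hok
        rw [dfsGo_unfold, if_neg hnem, if_neg (by rw [hchk]; simp)]
        show (PySem.List.pyRange 1 (n + 1) 1).any _ = true ↔ _
        rw [List.any_eq_true]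
        constructor
        · rintro ⟨i, hi, hbody⟩
          rw [PySem.List.mem_pyRange_one] at hi
          obtain ⟨j, rfl⟩ : ∃ j : ℕ, i = (j : Int) + 1 := ⟨(i - 1).toNat, by omega⟩
          have hjlen : j < cs.length := by omega
          rw [Bool.and_eq_true] at hbody
          obtain ⟨hcond, hrec⟩ := hbody
          by_cases hi0 : idx = 0
          · rw [if_pos hi0]
            refine Or.inr ⟨hok, ?_⟩
            rw [show cnt cs 0 = 0 from by unfold cnt; rw [if_neg (by omega)]]
            omega
          · rw [show (idx == 0) = false from by simp [hi0], Bool.false_or,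
                Bool.and_eq_true, decide_eq_true_iff, decide_eq_true_iff] at hcond
            obtain ⟨hpos', hnp⟩ := hcond
            rw [getPy t0 cs hjlen] at hpos' hrec
            rw [setPy] at hrec
            have hsub := (ih t0 (cs.set j (cs.getD j 0 - 1)) (ans ++ [(j : Int) + 1]) n m (idx + 1)
              (by simpa using hlen)
              (by intro c hc
                  rcases List.mem_or_eq_of_mem_set hc with h | rfl
                  · exact hnn _ h
                  · omega)
              (by rw [sum_set_eq hjlen]; omega)
              (by push_cast [List.length_append, List.length_cons, List.length_nil]; omega)
              (by push_cast at hfuel ⊢; omega)).mp hrec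
            rw [if_neg (by omega),
                show idx + 1 - 1 = (ans.length : Int) from by omega,
                PySem.List.pyGet?_append_length, Option.getD_some,
                show m - (idx + 1) = m - idx - 1 from by ring] at hsub
            rw [if_neg hi0]
            refine Or.inr ⟨hok, ?_⟩
            by_contra hpbad
            exact branch_dead hnn hsum hL hok hpbad hjlen hnp hpos' hsub
        · intro hfeas
          have hp : 2 * cnt cs (if idx = 0 then 0 else (PySem.List.pyGet? ans (idx - 1)).getD 0)
              ≤ m - idx := by
            rcases hfeas with h0 | ⟨_, hp⟩
            · omega
            · exact hp
          obtain ⟨j, hjlen, hjp, hjpos, hfeas'⟩ := exists_step hnn hsum hL hok hp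
          refine ⟨(j : Int) + 1, ?_, ?_⟩
          · rw [PySem.List.mem_pyRange_one]; omega
          · rw [Bool.and_eq_true]
            constructor
            · by_cases hi0 : idx = 0
              · simp [hi0]
              · rw [show (idx == 0) = false from by simp [hi0], Bool.false_or,
                    Bool.and_eq_true, decide_eq_true_iff, decide_eq_true_iff]
                refine ⟨by rw [getPy t0 cs hjlen]; omega, ?_⟩
                rw [if_neg hi0] at hjp
                exact hjp
            · rw [getPy t0 cs hjlen, setPy]
              refine (ih t0 (cs.set j (cs.getD j 0 - 1)) (ans ++ [(j : Int) + 1]) n m (idx + 1)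
                (by simpa using hlen)
                (by intro c hc
                    rcases List.mem_or_eq_of_mem_set hc with h | rfl
                    · exact hnn _ h
                    · omega)
                (by rw [sum_set_eq hjlen]; omega)
                (by push_cast [List.length_append, List.length_cons, List.length_nil]; omega)
                (by push_cast at hfuel ⊢; omega)).mpr ?_
              rw [if_neg (by omega),
                  show idx + 1 - 1 = (ans.length : Int) from by omega,
                  PySem.List.pyGet?_append_length, Option.getD_some,
                  show m - (idx + 1) = m - idx - 1 from by ring]
              exact hfeas'

theorem dfs_alt_iff (t0 : Int) (cs ans : List Int) (n m idx : Int)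
    (hlen : (cs.length : Int) = n) (hnn : ∀ c ∈ cs, 0 ≤ c) (hsum : cs.sum = m - idx)
    (hans : (ans.length : Int) = idx) :
    (dfs_alt (t0 :: cs) ans n m idx = true ↔
      Feas cs (m - idx) (if idx = 0 then 0 else (PySem.List.pyGet? ans (idx - 1)).getD 0)) := by
  have hge : 0 ≤ m - idx := hsum ▸ list_sum_nonneg hnn
  unfold dfs_alt
  by_cases hL0 : m - idx = 0
  · rw [if_pos (by simp [hL0])]
    simp only [true_iff]
    exact Or.inl hL0
  · rw [if_neg (by simp [hL0])]
    have hL : 1 ≤ m - idx := by omega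
    rw [PySem.List.slice_from_one, List.tail_cons]
    by_cases hok : ∀ c ∈ cs, 2 * c ≤ (m - idx) + 1
    case neg =>
      have hany : cs.any (fun c => decide (c > PySem.Int.floordiv (m - idx + 1) 2)) = true := by
        rw [List.any_eq_true]
        push_neg at hok
        obtain ⟨c, hc, hcgt⟩ := hok
        refine ⟨c, hc, ?_⟩
        rw [decide_eq_true_iff]
        by_contra hle
        push_neg at hle
        have := (PySem.Int.le_floordiv_iff_mul_le (a := m - idx + 1) (b := 2) (q := c)
          (by norm_num)).mp hle
        omega
      rw [if_pos hany]
      simp only [Bool.false_eq_true, false_iff, Feas]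
      rintro (h0 | ⟨h1, _⟩)
      · omega
      · exact hok h1
    case pos =>
      have hany : cs.any (fun c => decide (c > PySem.Int.floordiv (m - idx + 1) 2)) = false := by
        rw [← Bool.not_eq_true, List.any_eq_true]
        rintro ⟨c, hc, hcgt⟩
        rw [decide_eq_true_iff] at hcgt
        exact hcgt.not_ge ((PySem.Int.le_floordiv_iff_mul_le (by norm_num)).mpr
          (by have := hok c hc; omega))
      rw [if_neg (by rw [hany]; simp)]
      by_cases hi0 : idx = 0
      · rw [if_neg (by simp [hi0])]
        simp only [true_iff]
        refine Or.inr ⟨hok, ?_⟩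
        rw [if_pos hi0, show cnt cs 0 = 0 from by unfold cnt; rw [if_neg (by omega)]]
        omega
      · rw [if_pos (by simp [hi0]), if_neg hi0]
        by_cases hcond : (1 ≤ (PySem.List.pyGet? ans (idx - 1)).getD 0 ∧
            (PySem.List.pyGet? ans (idx - 1)).getD 0 ≤ n ∧
            (PySem.List.pyGet? (t0 :: cs) ((PySem.List.pyGet? ans (idx - 1)).getD 0)).getD 0 >
              PySem.Int.floordiv (m - idx) 2)
        · obtain ⟨hp1, hpn, hpgt⟩ := hcond
          rw [if_pos (by rw [Bool.and_eq_true, Bool.and_eq_true]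
                         exact ⟨⟨decide_eq_true hp1, decide_eq_true hpn⟩, decide_eq_true hpgt⟩)]
          simp only [Bool.false_eq_true, false_iff, Feas]
          rintro (h0 | ⟨_, hp⟩)
          · omega
          · set pv := (PySem.List.pyGet? ans (idx - 1)).getD 0 with hpv
            obtain ⟨j, hjeq⟩ : ∃ j : ℕ, pv = (j : Int) + 1 := ⟨(pv - 1).toNat, by omega⟩
            have hjlen : j < cs.length := by omega
            rw [hjeq] at hp hpgt
            rw [getPy t0 cs hjlen] at hpgt
            rw [show cnt cs ((j : Int) + 1) = cs.getD j 0 from by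
              unfold cnt
              rw [if_pos (by omega), show ((j : Int) + 1 - 1).toNat = j by omega]] at hp
            have := hpgt.not_ge ((PySem.Int.le_floordiv_iff_mul_le (a := m - idx) (b := 2)
              (q := cs.getD j 0) (by norm_num)).mpr (by omega))
            exact this
        · rw [if_neg (by
              rw [Bool.and_eq_true, Bool.and_eq_true, decide_eq_true_iff, decide_eq_true_iff,
                  decide_eq_true_iff]
              rintro ⟨⟨h1, h2⟩, h3⟩
              exact hcond ⟨h1, h2, h3⟩)]
          simp only [true_iff]
          refine Or.inr ⟨hok, ?_⟩
          set pv := (PySem.List.pyGet? ans (idx - 1)).getD 0 with hpv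
          by_cases hpr : 1 ≤ pv ∧ pv ≤ (cs.length : Int)
          · obtain ⟨j, hjeq⟩ : ∃ j : ℕ, pv = (j : Int) + 1 := ⟨(pv - 1).toNat, by omega⟩
            have hjlen : j < cs.length := by omega
            rw [hjeq] at hcond ⊢
            have hple : (PySem.List.pyGet? (t0 :: cs) ((j : Int) + 1)).getD 0 ≤
                PySem.Int.floordiv (m - idx) 2 := by
              by_contra hgt
              push_neg at hgt
              exact hcond ⟨by omega, by omega, hgt⟩
            rw [getPy t0 cs hjlen] at hple
            have := (PySem.Int.le_floordiv_iff_mul_le (a := m - idx) (b := 2)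
              (q := cs.getD j 0) (by norm_num)).mp hple
            rw [show cnt cs ((j : Int) + 1) = cs.getD j 0 from by
              unfold cnt
              rw [if_pos (by omega), show ((j : Int) + 1 - 1).toNat = j by omega]]
            omega
          · rw [show cnt cs pv = 0 from by unfold cnt; rw [if_neg hpr]]
            omega

-- ===== VERDICT (by name: the statement is the Claim_ definition above) =====
theorem dfs_spec : Claim_equal_dfs := by
  intro tree ans n m idx _ hpre
  unfold Spec_dfs
  by_cases hidx : idx = m
  · simp [dfs, dfsGo, dfs_alt, hidx]
  rcases hpre with h | hbad | ⟨hlen, hnn, hsum, hans⟩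
  · exact absurd h hidx
  · push_neg at hbad
    obtain ⟨c, hc, hcgt⟩ := hbad
    cases tree with
    | nil => simp at hc
    | cons t0 cs =>
      simp only [List.tail_cons] at hc
      have hchk : check (t0 :: cs) (m - idx) = false := by
        rw [← Bool.not_eq_true, check_iff]
        intro hall
        exact absurd (hall c hc) (by omega)
      have hA : dfs (t0 :: cs) ans n m idx = false := by
        rw [dfs, dfsGo_unfold, if_neg (by simp [hidx]), if_pos (by rw [hchk]; rfl)]
      have hB : dfs_alt (t0 :: cs) ans n m idx = false := by
        unfold dfs_alt
        rw [if_neg (by simp only [beq_iff_eq]; omega),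
            PySem.List.slice_from_one, List.tail_cons, if_pos ?_]
        rw [List.any_eq_true]
        refine ⟨c, hc, ?_⟩
        rw [decide_eq_true_iff]
        by_contra hle
        push_neg at hle
        have := (PySem.Int.le_floordiv_iff_mul_le (a := m - idx + 1) (b := 2) (q := c)
          (by norm_num)).mp hle
        omega
      rw [hA, hB]
  cases tree with
  | nil =>
    simp only [List.tail_nil, List.sum_nil] at hsum
    exact absurd (by omega : idx = m) hidx
  | cons t0 cs =>
    simp only [List.tail_cons] at hnn hsum
    have hlen' : (cs.length : Int) = n := by
      simp only [List.length_cons] at hlen; push_cast at hlen ⊢; omega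
    rw [dfs, Bool.eq_iff_iff,
        dfsGo_eq (m - idx).toNat t0 cs ans n m idx hlen' hnn hsum hans (by omega),
        dfs_alt_iff t0 cs ans n m idx hlen' hnn hsum hans]
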